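-- pv_equiv track=rewrite | github.com/cubesky/meduza-network-planner | generators/gen_wireguard.py | _parse_peers
-- ===== SOURCE A (Python) =====
-- from typing import Any, Dict, List
--
-- def _parse_peers(cfg: Dict[str, str]) -> Dict[str, Dict[str, str]]:
--     peers: Dict[str, Dict[str, str]] = {}
--     for key, val in cfg.items():
--         if not key.startswith("peer/"):
--             continue
--         rest = key[len("peer/"):]
--         parts = rest.split("/", 1)
--         if len(parts) != 2:
--             continue
--         name, field = parts
--         peers.setdefault(name, {})
--         peers[name][field] = val
--     return peers
-- ===== SOURCE B (Python) =====
-- def _triple(key):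
--     if not key.startswith("peer/"):
--         return None
--     parts = key[len("peer/"):].split("/", 1)
--     if len(parts) != 2:
--         return None
--     return parts[0], parts[1]
--
--
-- def _parse_peers(cfg):
--     triples = [(t[0], t[1], val) for key, val in cfg.items() if (t := _triple(key)) is not None]
--     peers = {}
--     for name in dict.fromkeys(n for n, _, _ in triples):
--         peers[name] = {f: v for n, f, v in triples if n == name}
--     return peers
-- ===== Notes on version B (the rewrite author's own statement) =====
-- stated objective: alternative
-- what changed: A accumulates a nested dict in one incremental pass with setdefault; B first extracts the list of valid (name, field, value) triples via a parsing helper, then groups them: for each distinct name (dict.fromkeys order) it builds the inner dict by a comprehension over the triples.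
import Mathlib
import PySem

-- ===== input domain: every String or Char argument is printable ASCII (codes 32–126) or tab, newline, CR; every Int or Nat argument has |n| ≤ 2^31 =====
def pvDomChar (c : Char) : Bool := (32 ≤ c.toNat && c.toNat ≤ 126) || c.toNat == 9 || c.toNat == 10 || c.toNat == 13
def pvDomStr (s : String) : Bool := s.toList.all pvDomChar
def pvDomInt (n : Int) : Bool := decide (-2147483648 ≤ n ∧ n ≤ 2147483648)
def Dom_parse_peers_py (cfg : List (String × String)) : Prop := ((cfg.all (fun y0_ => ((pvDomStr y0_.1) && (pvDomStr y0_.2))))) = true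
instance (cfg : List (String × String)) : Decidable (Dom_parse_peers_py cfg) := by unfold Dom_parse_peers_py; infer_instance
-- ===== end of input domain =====

-- B replaces A's incremental nested-dict accumulation by a collect-then-group pipeline (same result; objective: alternative decomposition).

-- ===== PORT A =====
-- one pass: for each (key, val), parse the key inline and update the nested dict;
-- the separator "/" is non-empty, so split cannot raise (.getD [] is never taken)
def parse_peers_py (cfg : List (String × String)) : List (String × List (String × String)) :=
  (cfg.foldl (fun peers kv =>
      if PySem.Str.startswith kv.1 "peer/" then
        let parts := (PySem.Str.splitMax? (PySem.Str.slice kv.1 (some 5) none) "/" 1).getD []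
        if h : parts.length = 2 then
          let name := parts[0]'(by omega)
          let field := parts[1]'(by omega)
          let peers' := peers.setdefault name PySem.Dict.empty
          peers'.insert name ((peers'.getD name PySem.Dict.empty).insert field kv.2)
        else peers
      else peers)
    PySem.Dict.empty).items.map (fun p => (p.1, p.2.items))

-- ===== PORT B =====
-- B helper _triple: parse one key into (name, field) or None;
-- the separator "/" is non-empty, so split cannot raise (.getD [] is never taken)
def pvTriple? (key : String) : Option (String × String) :=
  if PySem.Str.startswith key "peer/" then
    let parts := (PySem.Str.splitMax? (PySem.Str.slice key (some 5) none) "/" 1).getD []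
    if h : parts.length = 2 then some (parts[0]'(by omega), parts[1]'(by omega)) else none
  else none

-- B: the comprehension collecting the valid (name, field, val) triples
def pvTriples (cfg : List (String × String)) : List (String × String × String) :=
  cfg.filterMap (fun kv => (pvTriple? kv.1).map (fun nf => (nf.1, nf.2, kv.2)))

-- B: the inner-dict comprehension {f: v for n, f, v in triples if n == name}
def pvInner (ts : List (String × String × String)) (name : String) : PySem.Dict String String :=
  ts.foldl (fun inner t => if t.1 == name then inner.insert t.2.1 t.2.2 else inner) PySem.Dict.empty

def parse_peers_py_alt (cfg : List (String × String)) : List (String × List (String × String)) :=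
  let ts := pvTriples cfg
  ((PySem.List.dedup (ts.map (·.1))).foldl
      (fun peers name => peers.insert name (pvInner ts name).items) PySem.Dict.empty).items

-- ===== PRECONDITION & SPEC =====
def Spec_parse_peers_py (cfg : List (String × String)) (out : List (String × List (String × String))) : Prop := out = parse_peers_py_alt cfg
instance (cfg : List (String × String)) (out : List (String × List (String × String))) : Decidable (Spec_parse_peers_py cfg out) := by unfold Spec_parse_peers_py; infer_instance

-- ===== CLAIM (what is proved, stated in full; the proofs are below) =====
def Claim_equal_parse_peers_py : Prop := ∀ (cfg : List (String × String)), Dom_parse_peers_py cfg → Spec_parse_peers_py cfg (parse_peers_py cfg)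

-- ===== LEMMAS AND PROOFS =====

-- A's loop body, as a function of one parsed triple (proof-only helper)
def pvStepA (peers : PySem.Dict String (PySem.Dict String String))
    (t : String × String × String) : PySem.Dict String (PySem.Dict String String) :=
  (peers.setdefault t.1 PySem.Dict.empty).insert t.1
    (((peers.setdefault t.1 PySem.Dict.empty).getD t.1 PySem.Dict.empty).insert t.2.1 t.2.2)

-- A's loop body equals a dispatch on B's key parser (stated over the raw test/split results)
lemma stepA_aux (peers : PySem.Dict String (PySem.Dict String String)) (v : String)
    (b : Bool) (o : Option (List String)) :
    (if b then
      let parts := o.getD []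
      if h : parts.length = 2 then
        let name := parts[0]'(by omega)
        let field := parts[1]'(by omega)
        let peers' := peers.setdefault name PySem.Dict.empty
        peers'.insert name ((peers'.getD name PySem.Dict.empty).insert field v)
      else peers
    else peers)
    = match (if b then
        (let parts := o.getD []
         if h : parts.length = 2 then some (parts[0]'(by omega), parts[1]'(by omega)) else none)
      else none : Option (String × String)) with
      | some nf => pvStepA peers (nf.1, nf.2, v)
      | none => peers := by
  cases b with
  | false => rfl
  | true =>
    by_cases hl : (o.getD []).length = 2
    · show (if h : (o.getD []).length = 2 then
          let name := (o.getD [])[0]'(by omega)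
          let field := (o.getD [])[1]'(by omega)
          let peers' := peers.setdefault name PySem.Dict.empty
          peers'.insert name ((peers'.getD name PySem.Dict.empty).insert field v)
        else peers) = _
      rw [dif_pos hl, dif_pos hl]; rfl
    · show (if h : (o.getD []).length = 2 then
          let name := (o.getD [])[0]'(by omega)
          let field := (o.getD [])[1]'(by omega)
          let peers' := peers.setdefault name PySem.Dict.empty
          peers'.insert name ((peers'.getD name PySem.Dict.empty).insert field v)
        else peers) = _
      rw [dif_neg hl, dif_neg hl]; rfl

lemma stepA_body_eq (peers : PySem.Dict String (PySem.Dict String String)) (kv : String × String) :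
    (if PySem.Str.startswith kv.1 "peer/" then
      let parts := (PySem.Str.splitMax? (PySem.Str.slice kv.1 (some 5) none) "/" 1).getD []
      if h : parts.length = 2 then
        let name := parts[0]'(by omega)
        let field := parts[1]'(by omega)
        let peers' := peers.setdefault name PySem.Dict.empty
        peers'.insert name ((peers'.getD name PySem.Dict.empty).insert field kv.2)
      else peers
    else peers)
    = match pvTriple? kv.1 with
      | some nf => pvStepA peers (nf.1, nf.2, kv.2)
      | none => peers := by
  exact stepA_aux peers kv.2 (PySem.Str.startswith kv.1 "peer/")
    (PySem.Str.splitMax? (PySem.Str.slice kv.1 (some 5) none) "/" 1)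

-- A's fold over cfg is the fold of pvStepA over the parsed triples
lemma foldA_eq_foldl_triples (cfg : List (String × String))
    (d : PySem.Dict String (PySem.Dict String String)) :
    cfg.foldl (fun peers kv =>
      if PySem.Str.startswith kv.1 "peer/" then
        let parts := (PySem.Str.splitMax? (PySem.Str.slice kv.1 (some 5) none) "/" 1).getD []
        if h : parts.length = 2 then
          let name := parts[0]'(by omega)
          let field := parts[1]'(by omega)
          let peers' := peers.setdefault name PySem.Dict.empty
          peers'.insert name ((peers'.getD name PySem.Dict.empty).insert field kv.2)
        else peers
      else peers) d
    = (pvTriples cfg).foldl pvStepA d := by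
  induction cfg generalizing d with
  | nil => rfl
  | cons kv rest ih =>
    rw [List.foldl_cons, ih]
    have hb := stepA_body_eq d kv
    rw [show pvTriples (kv :: rest)
        = (match pvTriple? kv.1 with
           | some nf => (nf.1, nf.2, kv.2) :: pvTriples rest
           | none => pvTriples rest) from by
      simp only [pvTriples, List.filterMap_cons]
      cases pvTriple? kv.1 <;> rfl]
    cases h : pvTriple? kv.1 with
    | none => rw [h] at hb; rw [hb]
    | some nf => rw [h] at hb; rw [List.foldl_cons, hb]

lemma pvInner_concat (us : List (String × String × String)) (t : String × String × String)
    (n : String) :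
    pvInner (us ++ [t]) n
      = if t.1 = n then (pvInner us n).insert t.2.1 t.2.2 else pvInner us n := by
  simp [pvInner, List.foldl_append]

lemma pvInner_empty (us : List (String × String × String)) (n : String)
    (h : n ∉ us.map (·.1)) : pvInner us n = PySem.Dict.empty := by
  induction us with
  | nil => rfl
  | cons t rest ih =>
    simp only [List.map_cons, List.mem_cons, not_or] at h
    have ht : (t.1 == n) = false := by
      simp only [beq_eq_false_iff_ne, ne_eq]
      exact fun e => h.1 e.symm
    simp only [pvInner, List.foldl_cons, ht, Bool.false_eq_true, if_false]
    exact ih h.2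

lemma dedup_concat (xs : List String) (x : String) :
    PySem.List.dedup (xs ++ [x])
      = if x ∈ xs then PySem.List.dedup xs else PySem.List.dedup xs ++ [x] := by
  have h : PySem.List.dedup (xs ++ [x]) = (PySem.Set.ofList xs).add x := by
    simp [PySem.List.dedup, PySem.Set.ofList, List.foldl_append]
  rw [h, PySem.Set.add]
  by_cases hx : x ∈ xs
  · simp [hx, PySem.List.dedup]
  · simp [hx, PySem.List.dedup]

-- main invariant: the nested dict A accumulates, described as the group-by B computes
lemma items_foldl_stepA (ts : List (String × String × String)) :
    (ts.foldl pvStepA PySem.Dict.empty).items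
      = (PySem.List.dedup (ts.map (·.1))).map (fun n => (n, pvInner ts n)) := by
  induction ts using List.reverseRecOn with
  | nil => rfl
  | append_singleton us t ih =>
    obtain ⟨n, f, v⟩ := t
    have hkeys : (us.foldl pvStepA PySem.Dict.empty).keys = PySem.List.dedup (us.map (·.1)) := by
      simp only [PySem.Dict.keys, ih, List.map_map]
      simp [Function.comp_def]
    have hnd : (us.foldl pvStepA PySem.Dict.empty).keys.Nodup := by
      rw [hkeys, PySem.List.dedup_eq_ofList]; exact PySem.Set.nodup_ofList _
    rw [List.foldl_append, List.foldl_cons, List.foldl_nil, List.map_append]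
    simp only [List.map_cons, List.map_nil]
    by_cases hn : n ∈ us.map (·.1)
    · -- name already present: overwrite in place
      have hc : (us.foldl pvStepA PySem.Dict.empty).contains n = true := by
        rw [PySem.Dict.contains_iff_mem_keys, hkeys, PySem.List.dedup_eq_ofList]
        exact (PySem.Set.mem_ofList _ _).2 hn
      have hmem : (n, pvInner us n) ∈ (us.foldl pvStepA PySem.Dict.empty).items := by
        rw [ih]
        exact List.mem_map_of_mem
          (by rw [PySem.List.dedup_eq_ofList]; exact (PySem.Set.mem_ofList _ _).2 hn)
      have hget : (us.foldl pvStepA PySem.Dict.empty).getD n PySem.Dict.empty = pvInner us n :=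
        PySem.Dict.getD_of_mem_items _ hmem hnd _
      rw [pvStepA]
      simp only []
      rw [PySem.Dict.setdefault_of_contains _ _ hc, hget,
        PySem.Dict.items_insert_of_contains _ _ hc, ih, dedup_concat, if_pos hn, List.map_map]
      apply List.map_congr_left
      intro m hm
      have hmus : m ∈ us.map (·.1) := by
        rw [PySem.List.dedup_eq_ofList] at hm
        exact (PySem.Set.mem_ofList _ _).1 hm
      by_cases hmn : m = n
      · subst hmn
        simp [pvInner_concat]
      · have hnm : ¬ n = m := fun e => hmn e.symm
        simp [pvInner_concat, hnm, hmn]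
    · -- fresh name: append
      have hc : (us.foldl pvStepA PySem.Dict.empty).contains n = false := by
        rw [PySem.Dict.contains_eq_decide_mem_keys, hkeys, PySem.List.dedup_eq_ofList]
        simp [PySem.Set.mem_ofList, hn]
      rw [pvStepA]
      simp only []
      rw [PySem.Dict.setdefault_of_not_contains _ _ hc, PySem.Dict.getD_insert_self,
        PySem.Dict.insert_insert_self, PySem.Dict.items_insert_of_not_contains _ _ hc, ih,
        dedup_concat, if_neg hn, List.map_append]
      congr 1
      · apply List.map_congr_left
        intro m hm
        have hmus : m ∈ us.map (·.1) := by
          rw [PySem.List.dedup_eq_ofList] at hm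
          exact (PySem.Set.mem_ofList _ _).1 hm
        have hmn : ¬ (n = m) := fun e => hn (e ▸ hmus)
        simp [pvInner_concat, hmn]
      · simp [pvInner_concat, pvInner_empty us n hn]

-- ===== VERDICT (by name: the statement is the Claim_ definition above) =====
theorem parse_peers_py_spec : Claim_equal_parse_peers_py := by
  intro cfg _
  show parse_peers_py cfg = parse_peers_py_alt cfg
  rw [parse_peers_py, parse_peers_py_alt, foldA_eq_foldl_triples, items_foldl_stepA,
    List.map_map]
  rw [PySem.Dict.items_foldl_insert_fresh _ (fun n => n) _ _
    (fun a _ => PySem.Dict.contains_empty a)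
    (by simp [PySem.List.dedup_eq_ofList,
      PySem.Set.nodup_ofList ((pvTriples cfg).map (·.1))])]
  simp [Function.comp_def, PySem.Dict.empty]
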